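-- pv_equiv track=rewrite | github.com/kevinrunescape1997/svg-optimizer-gui | pixel_svg_optimizer.py | _sorted_attribs
-- ===== SOURCE A (Python) =====
-- from typing import Dict, List, Set, Tuple, Optional, Callable
--
-- def _sorted_attribs(attrs: dict[str, str], prefer_order: List[str] | None = None) -> dict[str, str]:
--     if not attrs:
--         return {}
--     prefer_order = prefer_order or []
--     prefer_rank = {k: i for i, k in enumerate(prefer_order)}
--
--     def key_sort(k: str) -> tuple[int, int, str]:
--         pref = prefer_rank.get(k, len(prefer_order))
--         d_last = 1 if k == "d" else 0
--         return (pref, d_last, k)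
--
--     ordered: dict[str, str] = {}
--     for k in sorted(attrs.keys(), key=key_sort):
--         ordered[k] = attrs[k]
--     return ordered
-- ===== SOURCE B (Python) =====
-- def _sorted_attribs(attrs, prefer_order=None):
--     if not attrs:
--         return {}
--     po = prefer_order or []
--     rank = {k: i for i, k in enumerate(po)}
--     # phase 1: preferred keys that exist in attrs, ordered by their rank
--     pref_keys = [k for k, _ in sorted(rank.items(), key=lambda kv: kv[1]) if k in attrs]
--     # phase 2: the remaining keys, alphabetical with 'd' last
--     rest = sorted((k for k in attrs if k not in rank), key=lambda k: (k == "d", k))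
--     return {k: attrs[k] for k in pref_keys + rest}
-- ===== Notes on version B (the rewrite author's own statement) =====
-- stated objective: alternative
-- what changed: Replaces A's single sort of all keys under a composite (rank, d-last, key) triple by a two-phase construction: preferred keys ordered by sorting the rank dict's items by rank, then the remaining keys sorted alphabetically with 'd' last, concatenated.
import Mathlib
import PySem

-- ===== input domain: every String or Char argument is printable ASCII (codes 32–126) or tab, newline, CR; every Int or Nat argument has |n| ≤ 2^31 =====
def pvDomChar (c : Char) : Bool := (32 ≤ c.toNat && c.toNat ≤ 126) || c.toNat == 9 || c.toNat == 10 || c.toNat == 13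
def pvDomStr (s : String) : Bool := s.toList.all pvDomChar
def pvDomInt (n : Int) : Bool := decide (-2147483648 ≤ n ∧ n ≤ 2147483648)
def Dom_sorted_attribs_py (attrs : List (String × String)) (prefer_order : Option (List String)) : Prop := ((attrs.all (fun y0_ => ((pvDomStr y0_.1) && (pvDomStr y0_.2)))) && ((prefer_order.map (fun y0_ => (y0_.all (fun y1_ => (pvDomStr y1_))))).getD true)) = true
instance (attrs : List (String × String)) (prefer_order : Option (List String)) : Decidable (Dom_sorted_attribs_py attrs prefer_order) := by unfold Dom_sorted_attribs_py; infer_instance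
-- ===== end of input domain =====

-- B replaces A's single sort of all keys under a composite (rank, d-last, key) triple by a
-- two-phase construction (preferred keys ordered by rank, then the rest alphabetically with
-- 'd' last); equal return values, same asymptotic cost ("alternative").

-- ===== PORT A =====
-- prefer_rank = {k: i for i, k in enumerate(prefer_order)}
def pvRankDict (po : List String) : PySem.Dict String Int :=
  (PySem.List.enumerate po).foldl (fun d p => d.insert p.2 p.1) PySem.Dict.empty

-- key_sort(k) = (pref, d_last, k).  Python compares this 3-tuple lexicographically; since
-- d_last ∈ {0,1}, the pair (2*pref + d_last, k) under the lexicographic order ×ₗ is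
-- order-isomorphic to it, exactly — this encoding is the only deviation from the literal tuple.
def pvKeySortA (n : Int) (rank : PySem.Dict String Int) (k : String) : Int ×ₗ String :=
  toLex (2 * rank.getD k n + (if k == "d" then 1 else 0), k)

def sorted_attribs_py (attrs : List (String × String)) (prefer_order : Option (List String)) : List (String × String) :=
  if attrs = [] then []
  else
    let po := prefer_order.getD []
    let prefer_rank := pvRankDict po
    let d := PySem.Dict.ofList attrs
    let ks := PySem.List.sorted d.keys (pvKeySortA (po.length) prefer_rank)
    -- ordered[k] = attrs[k]; k is always a key of attrs, so attrs[k] = d.getD k ""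
    (ks.foldl (fun (o : PySem.Dict String String) k => o.insert k (d.getD k "")) PySem.Dict.empty).items

-- ===== PORT B =====
-- lambda k: (k == "d", k) — Python's (bool, str) tuple; False < True is encoded as 0 < 1 : Int,
-- lexicographic pair order ×ₗ is exactly Python's tuple order.
def pvKeySortB (k : String) : Int ×ₗ String :=
  toLex ((if k == "d" then 1 else 0 : Int), k)

def sorted_attribs_py_alt (attrs : List (String × String)) (prefer_order : Option (List String)) : List (String × String) :=
  if attrs = [] then []
  else
    let po := prefer_order.getD []
    let rank := pvRankDict po
    let d := PySem.Dict.ofList attrs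
    let pref_keys := ((PySem.List.sorted rank.items (fun kv => kv.2)).map Prod.fst).filter (fun k => d.contains k)
    let rest := PySem.List.sorted (d.keys.filter (fun k => !rank.contains k)) pvKeySortB
    (pref_keys ++ rest).map (fun k => (k, d.getD k ""))

-- ===== PRECONDITION & SPEC =====
def Spec_sorted_attribs_py (attrs : List (String × String)) (prefer_order : Option (List String)) (out : List (String × String)) : Prop := out = sorted_attribs_py_alt attrs prefer_order
instance (attrs : List (String × String)) (prefer_order : Option (List String)) (out : List (String × String)) : Decidable (Spec_sorted_attribs_py attrs prefer_order out) := by unfold Spec_sorted_attribs_py; infer_instance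

-- ===== CLAIM (what is proved, stated in full; the proofs are below) =====
def Claim_equal_sorted_attribs_py : Prop := ∀ (attrs : List (String × String)) (prefer_order : Option (List String)), Dom_sorted_attribs_py attrs prefer_order → Spec_sorted_attribs_py attrs prefer_order (sorted_attribs_py attrs prefer_order)

-- ===== LEMMAS AND PROOFS =====

theorem pvFold_items_sub (l : List (Int × String)) (d : PySem.Dict String Int) :
    ∀ p ∈ (l.foldl (fun d p => d.insert p.2 p.1) d).items, (p.2, p.1) ∈ l ∨ p ∈ d.items := by
  induction l generalizing d with
  | nil => simp
  | cons q l ih =>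
    intro p hp
    rcases ih (d.insert q.2 q.1) p hp with h | h
    · exact Or.inl (List.mem_cons_of_mem _ h)
    · rcases (PySem.Dict.mem_items_insert _ _ _ _).1 h with h | h
      · left; rw [h]; exact List.mem_cons_self
      · exact Or.inr h.1

theorem pvRank_items_sub (po : List String) :
    ∀ p ∈ (pvRankDict po).items, (p.2, p.1) ∈ PySem.List.enumerate po := by
  intro p hp
  rcases pvFold_items_sub _ _ p hp with h | h
  · exact h
  · simp [PySem.Dict.empty] at h

theorem pvRank_keys_nodup (po : List String) : (pvRankDict po).keys.Nodup :=
  PySem.Dict.nodup_keys_foldl_insert_key _ (fun p : Int × String => p.2) (fun d p => p.1) _ (by simp)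

theorem pvEnum_mem (po : List String) (p : Int × String) (h : p ∈ PySem.List.enumerate po) :
    0 ≤ p.1 ∧ p.1 < po.length ∧ ∀ q ∈ PySem.List.enumerate po, q.1 = p.1 → q = p := by
  rw [PySem.List.mem_enumerate_iff] at h
  obtain ⟨k, hk, rfl⟩ := h
  refine ⟨by simp, by simpa using hk, ?_⟩
  intro q hq hq1
  rw [PySem.List.mem_enumerate_iff] at hq
  obtain ⟨j, hj, rfl⟩ := hq
  have : j = k := by simp at hq1; exact_mod_cast hq1
  subst this
  rfl

theorem pvKeys_eq (attrs : List (String × String)) (po : List String) :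
    PySem.List.sorted (PySem.Dict.ofList attrs).keys (pvKeySortA (po.length) (pvRankDict po)) =
      (((PySem.List.sorted (pvRankDict po).items (fun kv => kv.2)).map Prod.fst).filter
          (fun k => (PySem.Dict.ofList attrs).contains k)) ++
        PySem.List.sorted ((PySem.Dict.ofList attrs).keys.filter
          (fun k => !(pvRankDict po).contains k)) pvKeySortB := by
  set R := pvRankDict po with hR
  set dd := PySem.Dict.ofList attrs with hdd
  set n : Int := (po.length : Int) with hn
  set S := PySem.List.sorted R.items (fun kv => kv.2) with hS
  set F := dd.keys.filter (fun k => !R.contains k) with hF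
  set rest := PySem.List.sorted F pvKeySortB with hrest
  have hkn : dd.keys.Nodup := PySem.Dict.nodup_keys_ofList attrs
  have hRkn : R.keys.Nodup := pvRank_keys_nodup po
  have hkeysdef : R.keys = R.items.map Prod.fst := rfl
  have hS_perm : S.Perm R.items := PySem.List.sorted_perm _ _ _
  have hmapfst : (S.map Prod.fst).Perm (R.items.map Prod.fst) := hS_perm.map _
  have hmf_nd : (S.map Prod.fst).Nodup := hmapfst.nodup_iff.2 (hkeysdef ▸ hRkn)
  have hitems_nd : R.items.Nodup := (hkeysdef ▸ hRkn).of_map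
  have hS_nd : S.Nodup := hS_perm.nodup_iff.2 hitems_nd
  have hF_nd : F.Nodup := hkn.filter _
  have hrest_perm : rest.Perm F := PySem.List.sorted_perm _ _ _
  have hrest_nd : rest.Nodup := hrest_perm.nodup_iff.2 hF_nd
  have hpref_nd : ((S.map Prod.fst).filter (fun k => dd.contains k)).Nodup := hmf_nd.filter _
  -- membership characterisations
  have hprefmem : ∀ k, k ∈ (S.map Prod.fst).filter (fun k => dd.contains k) ↔
      (k ∈ R.items.map Prod.fst ∧ k ∈ dd.keys) := by
    intro k
    rw [List.mem_filter]
    constructor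
    · rintro ⟨hk, hc⟩
      exact ⟨hmapfst.mem_iff.1 hk, (PySem.Dict.contains_iff_mem_keys _ _).1 hc⟩
    · rintro ⟨hk, hc⟩
      exact ⟨hmapfst.mem_iff.2 hk, (PySem.Dict.contains_iff_mem_keys _ _).2 hc⟩
  have hrestmem : ∀ k, k ∈ rest ↔ (k ∈ dd.keys ∧ R.contains k = false) := by
    intro k
    rw [hrest, PySem.List.mem_sorted, hF, List.mem_filter]
    simp
  -- getD facts
  have hgetD_pref : ∀ p ∈ S, R.getD p.1 n = p.2 := by
    intro p hp
    exact PySem.Dict.getD_of_mem_items _ (by simpa using hS_perm.mem_iff.1 hp) hRkn _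
  have hlt_pref : ∀ p ∈ S, 0 ≤ p.2 ∧ p.2 < po.length := by
    intro p hp
    have he := pvRank_items_sub po p (hS_perm.mem_iff.1 hp)
    have := pvEnum_mem po (p.2, p.1) he
    exact ⟨this.1, this.2.1⟩
  have hgetD_rest : ∀ k ∈ rest, R.getD k n = n := by
    intro k hk
    exact PySem.Dict.getD_of_not_contains _ _ ((hrestmem k).1 hk).2
  -- pairwise on S strict
  have hSpw : S.Pairwise (fun p q => p.2 ≤ q.2) := PySem.List.sorted_pairwise _ _
  have hSlt : S.Pairwise (fun p q => p.2 < q.2) := by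
    refine (hSpw.and hS_nd).imp_of_mem ?_
    intro p q hp hq ⟨hle, hne⟩
    rcases lt_or_eq_of_le hle with h | h
    · exact h
    · exfalso
      have hpe := pvRank_items_sub po p (hS_perm.mem_iff.1 hp)
      have hqe := pvRank_items_sub po q (hS_perm.mem_iff.1 hq)
      have := (pvEnum_mem po (p.2, p.1) hpe).2.2 (q.2, q.1) hqe (by simpa using h.symm)
      apply hne
      have h1 : q.2 = p.2 := congrArg Prod.fst this
      have h2 : q.1 = p.1 := congrArg Prod.snd this
      exact Prod.ext h2.symm h1.symm
  -- pairwise keyA on pref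
  have hprefpw : ((S.map Prod.fst).filter (fun k => dd.contains k)).Pairwise
      (fun a b => pvKeySortA n R a < pvKeySortA n R b) := by
    apply List.Pairwise.filter
    rw [List.pairwise_map]
    refine hSlt.imp_of_mem ?_
    intro p q hp hq hlt
    unfold pvKeySortA
    rw [Prod.Lex.toLex_lt_toLex]
    left
    rw [hgetD_pref p hp, hgetD_pref q hq]
    split_ifs <;> omega
  -- pairwise keyA on rest
  have hrestpw : rest.Pairwise (fun a b => pvKeySortA n R a < pvKeySortA n R b) := by
    have h1 : rest.Pairwise (fun a b => pvKeySortB a ≤ pvKeySortB b) :=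
      PySem.List.sorted_pairwise _ _
    refine ((h1.and hrest_nd).imp_of_mem ?_)
    intro a b ha hb ⟨hle, hne⟩
    have hblt : pvKeySortB a < pvKeySortB b := by
      rcases lt_or_eq_of_le hle with h | h
      · exact h
      · exact absurd (congrArg (fun t => (ofLex t).2) h) hne
    unfold pvKeySortA
    rw [hgetD_rest a ha, hgetD_rest b hb]
    unfold pvKeySortB at hblt
    rw [Prod.Lex.toLex_lt_toLex] at hblt ⊢
    rcases hblt with h | ⟨h1, h2⟩
    · left; simp only at h ⊢; omega
    · right; simp only at h1 ⊢; exact ⟨by omega, h2⟩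
  -- cross
  have hcross : ∀ a ∈ (S.map Prod.fst).filter (fun k => dd.contains k), ∀ b ∈ rest,
      pvKeySortA n R a < pvKeySortA n R b := by
    intro a ha b hb
    obtain ⟨p, hp, rfl⟩ := List.mem_map.1 (List.mem_filter.1 ha).1
    unfold pvKeySortA
    rw [Prod.Lex.toLex_lt_toLex]
    left
    rw [hgetD_pref p hp, hgetD_rest b hb]
    have := hlt_pref p hp
    split_ifs <;> simp only [hn] <;> omega
  -- assemble
  apply PySem.List.sorted_eq_of_perm_of_pairwise_lt
  · rw [List.perm_ext_iff_of_nodup ?_ hkn]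
    · intro k
      rw [List.mem_append, hprefmem, hrestmem]
      constructor
      · rintro (⟨_, hk⟩ | ⟨hk, _⟩) <;> exact hk
      · intro hk
        by_cases hc : R.contains k = true
        · exact Or.inl ⟨(PySem.Dict.contains_iff_mem_keys _ _).1 hc, hk⟩
        · exact Or.inr ⟨hk, by simpa using hc⟩
    · refine hpref_nd.append hrest_nd ?_
      intro k hk1 hk2
      have h1 : k ∈ R.keys := hkeysdef ▸ ((hprefmem k).1 hk1).1
      have h2 : R.contains k = false := ((hrestmem k).1 hk2).2
      rw [← PySem.Dict.contains_iff_mem_keys] at h1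
      rw [h1] at h2
      exact Bool.true_eq_false.mp h2 |>.elim
  · rw [List.pairwise_append]
    exact ⟨hprefpw, hrestpw, hcross⟩

-- ===== VERDICT =====
theorem sorted_attribs_py_spec : Claim_equal_sorted_attribs_py := by
  intro attrs prefer_order _
  unfold Spec_sorted_attribs_py sorted_attribs_py sorted_attribs_py_alt
  by_cases h : attrs = []
  · simp [h]
  · simp only [if_neg h]
    set p := prefer_order.getD [] with hp
    have hks_nd : (PySem.List.sorted (PySem.Dict.ofList attrs).keys
        (pvKeySortA (p.length) (pvRankDict p))).Nodup :=
      (PySem.List.sorted_perm _ _ _).nodup_iff.2 (PySem.Dict.nodup_keys_ofList attrs)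
    rw [PySem.Dict.items_foldl_insert_fresh _ (fun a => a)
      (fun a => (PySem.Dict.ofList attrs).getD a "") PySem.Dict.empty (by simp)
      (by simpa using hks_nd)]
    rw [pvKeys_eq attrs p]
    simp [PySem.Dict.empty]
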